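-- pv_equiv track=rewrite | github.com/NPACore/mrrc-hdr-qa | mrqart/email_latest_flip.py | compact_error_keys
-- ===== SOURCE A (Python) =====
-- from typing import Any, Callable, Dict, Iterable, List, Mapping, Optional, Tuple
--
-- def compact_error_keys(
--     errors: Dict[str, Any], prefer_cols: List[str], max_items: int = 6
-- ) -> str:
--     """
--     errors is dict keyed by col name. prefer marquee cols + TA first.
--     """
--     prefer = list(prefer_cols) + ["TA"]
--     ordered: List[str] = []
--     seen: set[str] = set()
--
--     for k in prefer:
--         if k in errors and k not in seen:
--             ordered.append(k)
--             seen.add(k)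
--
--     for k in sorted(errors.keys()):
--         if k not in seen:
--             ordered.append(k)
--             seen.add(k)
--
--     ordered = ordered[:max_items]
--     return ", ".join(ordered) if ordered else "diff"
-- ===== SOURCE B (Python) =====
-- def compact_error_keys(errors, prefer_cols, max_items=6):
--     """Single composite-key sort: rank table (first-occurrence index, inf-rank tail by name)."""
--     rank = {c: i for i, c in enumerate(dict.fromkeys(prefer_cols + ["TA"]))}
--     n = len(rank)
--     ordered = sorted(errors, key=lambda k: (rank.get(k, n), k))[:max_items]
--     return ", ".join(ordered) if ordered else "diff"
-- ===== Notes on version B (the rewrite author's own statement) =====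
-- stated objective: alternative
-- what changed: A's two-pass partition (preferred-column loop with a seen set, then a loop over sorted keys skipping seen ones) is replaced by a single stable sort of the keys under the composite key (first-occurrence rank in prefer_cols+['TA'], key name), built from a rank table.
import Mathlib
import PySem

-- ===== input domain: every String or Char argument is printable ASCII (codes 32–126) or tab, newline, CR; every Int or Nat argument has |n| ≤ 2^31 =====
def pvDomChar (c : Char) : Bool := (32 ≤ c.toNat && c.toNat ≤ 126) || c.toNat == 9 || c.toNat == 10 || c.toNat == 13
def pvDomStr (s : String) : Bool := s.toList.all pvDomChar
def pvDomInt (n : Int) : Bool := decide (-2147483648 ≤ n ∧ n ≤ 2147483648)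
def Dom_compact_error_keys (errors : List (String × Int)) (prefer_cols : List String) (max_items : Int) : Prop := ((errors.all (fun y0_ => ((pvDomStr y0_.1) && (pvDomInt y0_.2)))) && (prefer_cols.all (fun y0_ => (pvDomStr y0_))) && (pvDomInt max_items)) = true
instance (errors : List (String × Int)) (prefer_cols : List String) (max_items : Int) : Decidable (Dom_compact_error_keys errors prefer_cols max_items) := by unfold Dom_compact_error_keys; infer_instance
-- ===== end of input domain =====

-- B replaces A's two-pass partition (preferred loop with a seen set, then a sorted-remainder loop)
-- by one composite-key sort over a first-occurrence rank table; objective: alternative decomposition, not speed.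

-- ===== PORT A =====
-- dict semantics by hand (exact): `k in errors` is key membership, i.e. membership in errors.map (·.1);
-- errors.keys() iterates the distinct keys in first-occurrence order = PySem.List.dedup (errors.map (·.1)).
def compact_error_keys (errors : List (String × Int)) (prefer_cols : List String) (max_items : Int) : String :=
  let prefer := prefer_cols ++ ["TA"]
  let keyList := errors.map (·.1)
  -- for k in prefer: if k in errors and k not in seen: ordered.append(k); seen.add(k)
  let st1 := prefer.foldl
    (fun (p : List String × PySem.Set String) k =>
      if decide (k ∈ keyList) && !decide (k ∈ p.2) then (p.1 ++ [k], PySem.Set.add p.2 k) else p)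
    ([], PySem.Set.ofList [])
  -- for k in sorted(errors.keys()): if k not in seen: ordered.append(k); seen.add(k)
  let st2 := (PySem.List.sorted (PySem.List.dedup keyList) (fun x => x) false).foldl
    (fun (p : List String × PySem.Set String) k =>
      if !decide (k ∈ p.2) then (p.1 ++ [k], PySem.Set.add p.2 k) else p)
    st1
  let ordered := PySem.List.slice st2.1 none (some max_items)
  if ordered ≠ [] then PySem.Str.join ", " ordered else "diff"

-- ===== PORT B =====
-- rank = {c: i for i, c in enumerate(dict.fromkeys(prefer_cols + ["TA"]))}; the Python tuple key
-- (rank.get(k, n), k) is ported as a Lex (Int × String) key: Lex order = Python tuple comparison.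
def compact_error_keys_alt (errors : List (String × Int)) (prefer_cols : List String) (max_items : Int) : String :=
  let rank : PySem.Dict String Int :=
    (PySem.List.enumerate (PySem.List.dedup (prefer_cols ++ ["TA"]))).foldl
      (fun d p => d.insert p.2 p.1) PySem.Dict.empty
  let n : Int := PySem.Dict.size rank
  let ordered := PySem.List.slice
    (PySem.List.sorted (PySem.List.dedup (errors.map (·.1)))
      (fun k => toLex (rank.getD k n, k)) false)
    none (some max_items)
  if ordered = [] then "diff" else PySem.Str.join ", " ordered

-- ===== PRECONDITION & SPEC =====
def Spec_compact_error_keys (errors : List (String × Int)) (prefer_cols : List String) (max_items : Int) (out : String) : Prop := out = compact_error_keys_alt errors prefer_cols max_items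
instance (errors : List (String × Int)) (prefer_cols : List String) (max_items : Int) (out : String) : Decidable (Spec_compact_error_keys errors prefer_cols max_items out) := by unfold Spec_compact_error_keys; infer_instance

-- ===== CLAIM (what is proved, stated in full; the proofs are below) =====
def Claim_equal_compact_error_keys : Prop := ∀ (errors : List (String × Int)) (prefer_cols : List String) (max_items : Int), Dom_compact_error_keys errors prefer_cols max_items → Spec_compact_error_keys errors prefer_cols max_items (compact_error_keys errors prefer_cols max_items)

-- ===== LEMMAS AND PROOFS =====

-- abbreviations for the proof: key list, deduped prefer list, deduped key list, its sort,
-- the preferred block P and the sorted remainder S that A's two loops produce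
def pvKL (errors : List (String × Int)) : List String := errors.map (·.1)
def pvDP (pc : List String) : List String := PySem.Set.ofList (pc ++ ["TA"])
def pvKS (errors : List (String × Int)) : List String := PySem.Set.ofList (pvKL errors)
def pvSrt (errors : List (String × Int)) : List String := PySem.List.sorted (pvKS errors) (fun x => x) false
def pvP (errors : List (String × Int)) (pc : List String) : List String :=
  (pvDP pc).filter (fun k => decide (k ∈ pvKL errors))
def pvS (errors : List (String × Int)) (pc : List String) : List String :=
  (pvSrt errors).filter (fun k => !decide (k ∈ pvDP pc))
def pvRank (pc : List String) : PySem.Dict String Int :=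
  (PySem.List.enumerate (PySem.List.dedup (pc ++ ["TA"]))).foldl
    (fun d p => d.insert p.2 p.1) PySem.Dict.empty
def pvKeyB (pc : List String) (k : String) : Lex (Int × String) :=
  toLex ((pvRank pc).getD k ((pvRank pc).size : Int), k)

-- A's "append if unseen" loop, characterised: result = acc ++ filtered dedup of the scanned list
theorem pv_loopA (c : String → Bool) (l : List String) (acc : List String) (s : PySem.Set String)
    (h : ∀ x, x ∈ s ↔ x ∈ acc) :
    (l.foldl (fun (p : List String × PySem.Set String) k =>
        if c k && !decide (k ∈ p.2) then (p.1 ++ [k], PySem.Set.add p.2 k) else p) (acc, s)).1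
      = acc ++ (PySem.Set.ofList l).filter (fun k => c k && !decide (k ∈ acc))
    ∧ ∀ x, x ∈ (l.foldl (fun (p : List String × PySem.Set String) k =>
        if c k && !decide (k ∈ p.2) then (p.1 ++ [k], PySem.Set.add p.2 k) else p) (acc, s)).2
        ↔ x ∈ (l.foldl (fun (p : List String × PySem.Set String) k =>
        if c k && !decide (k ∈ p.2) then (p.1 ++ [k], PySem.Set.add p.2 k) else p) (acc, s)).1 := by
  induction l generalizing acc s with
  | nil =>
    refine ⟨by simp [PySem.Set.ofList_nil], ?_⟩
    simpa using h
  | cons k l ih =>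
    simp only [List.foldl_cons]
    by_cases hck : c k = true ∧ k ∉ acc
    · have hs : decide (k ∈ s) = false := by simp [h, hck.2]
      rw [if_pos (by simp [hck.1, hs])]
      obtain ⟨ih1, ih2⟩ := ih (acc ++ [k]) (s.add k)
        (by intro x; simp [PySem.Set.mem_add, h x, List.mem_append])
      refine ⟨?_, ih2⟩
      rw [ih1, PySem.Set.ofList_cons]
      have hq : (c k && !decide (k ∈ acc)) = true := by simp [hck.1, hck.2]
      have hd : (PySem.Set.ofList l).discard k
          = (PySem.Set.ofList l).filter (fun y => !(y == k)) := by
        simp [PySem.Set.discard]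
      simp only [List.filter_cons, hq, if_true, hd, List.filter_filter,
        List.append_assoc, List.singleton_append]
      congr 1
      congr 1
      apply List.filter_congr
      intro j _
      by_cases hj : j = k
      · subst hj; simp
      · simp [hj, List.mem_append]
    · have hcond : (c k && !decide (k ∈ s)) = false := by
        rcases not_and_or.mp hck with h1 | h1
        · simp [Bool.eq_false_iff.mpr h1]
        · have : k ∈ s := (h k).mpr (not_not.mp h1)
          simp [this]
      rw [if_neg (by simp [hcond])]
      obtain ⟨ih1, ih2⟩ := ih acc s h
      refine ⟨?_, ih2⟩
      rw [ih1, PySem.Set.ofList_cons]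
      have hq : (c k && !decide (k ∈ acc)) = false := by
        rcases not_and_or.mp hck with h1 | h1
        · simp [Bool.eq_false_iff.mpr h1]
        · simp [not_not.mp h1]
      have hd : (PySem.Set.ofList l).discard k
          = (PySem.Set.ofList l).filter (fun y => !(y == k)) := by
        simp [PySem.Set.discard]
      simp only [List.filter_cons, hq, hd, List.filter_filter]
      congr 1
      apply List.filter_congr
      intro j _
      by_cases hj : j = k
      · subst hj; simp [hq]
      · simp [hj]

-- same loop without the membership condition (A's second loop)
theorem pv_loopA2 (l : List String) (acc : List String) (s : PySem.Set String)
    (h : ∀ x, x ∈ s ↔ x ∈ acc) :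
    (l.foldl (fun (p : List String × PySem.Set String) k =>
        if !decide (k ∈ p.2) then (p.1 ++ [k], PySem.Set.add p.2 k) else p) (acc, s)).1
      = acc ++ (PySem.Set.ofList l).filter (fun k => !decide (k ∈ acc)) := by
  have := (pv_loopA (fun _ => true) l acc s h).1
  simpa only [Bool.true_and] using this

theorem pv_rank_items (pc : List String) :
    (pvRank pc).items = (PySem.List.enumerate (pvDP pc)).map (fun p => (p.2, p.1)) := by
  unfold pvRank pvDP
  rw [PySem.List.dedup_eq_ofList]
  rw [PySem.Dict.items_foldl_insert_fresh _ _ _ _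
    (fun a _ => by simp [PySem.Dict.contains_empty])
    (by rw [PySem.List.map_snd_enumerate]; exact PySem.Set.nodup_ofList _)]
  simp [PySem.Dict.empty]

theorem pv_rank_keys (pc : List String) : (pvRank pc).keys = pvDP pc := by
  have hk : (pvRank pc).keys = (pvRank pc).items.map (·.1) := rfl
  rw [hk, pv_rank_items, List.map_map]
  exact PySem.List.map_snd_enumerate (pvDP pc) 0

theorem pv_rank_size (pc : List String) : (pvRank pc).size = (pvDP pc).length := by
  have hs : (pvRank pc).size = (pvRank pc).items.length := rfl
  rw [hs, pv_rank_items, List.length_map, PySem.List.length_enumerate]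

theorem pv_getD_not_mem (pc : List String) (k : String) (d0 : Int) (h : k ∉ pvDP pc) :
    (pvRank pc).getD k d0 = d0 := by
  apply PySem.Dict.getD_of_not_contains
  rw [Bool.eq_false_iff]
  intro hc
  exact h (pv_rank_keys pc ▸ (PySem.Dict.contains_iff_mem_keys _ _).mp hc)

theorem pv_getD_getElem (pc : List String) (i : Nat) (h : i < (pvDP pc).length) (d0 : Int) :
    (pvRank pc).getD (pvDP pc)[i] d0 = (i : Int) := by
  apply PySem.Dict.getD_of_mem_items (v := (i : Int))
  · rw [pv_rank_items]
    refine List.mem_map.mpr ⟨((i : Int), (pvDP pc)[i]), ?_, rfl⟩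
    rw [PySem.List.mem_enumerate_iff]
    exact ⟨i, h, by simp⟩
  · rw [pv_rank_keys]
    exact PySem.Set.nodup_ofList _

theorem pv_pairwise_P (errors : List (String × Int)) (pc : List String) :
    (pvP errors pc).Pairwise (fun a b => pvKeyB pc a < pvKeyB pc b) := by
  have hdp : (pvDP pc).Pairwise (fun a b => pvKeyB pc a < pvKeyB pc b) := by
    rw [List.pairwise_iff_getElem]
    intro i j hi hj hij
    unfold pvKeyB
    rw [pv_getD_getElem pc i hi, pv_getD_getElem pc j hj, Prod.Lex.toLex_lt_toLex]
    left
    show (i : Int) < (j : Int)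
    exact_mod_cast hij
  unfold pvP
  exact List.Pairwise.sublist List.filter_sublist hdp

theorem pv_pairwise_S (errors : List (String × Int)) (pc : List String) :
    (pvS errors pc).Pairwise (fun a b => pvKeyB pc a < pvKeyB pc b) := by
  have hsrt : (pvSrt errors).Pairwise (· < ·) := PySem.List.sorted_ofList_pairwise_lt _
  unfold pvS
  have hS : ((pvSrt errors).filter (fun k => !decide (k ∈ pvDP pc))).Pairwise (· < ·) :=
    List.Pairwise.sublist List.filter_sublist hsrt
  refine List.Pairwise.imp_of_mem ?_ hS
  intro a b ha hb hab
  have ha' : a ∉ pvDP pc := by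
    have := (List.mem_filter.mp ha).2; simpa using this
  have hb' : b ∉ pvDP pc := by
    have := (List.mem_filter.mp hb).2; simpa using this
  unfold pvKeyB
  rw [pv_getD_not_mem pc a _ ha', pv_getD_not_mem pc b _ hb', Prod.Lex.toLex_lt_toLex]
  exact Or.inr ⟨rfl, hab⟩

theorem pv_cross (errors : List (String × Int)) (pc : List String) :
    ∀ a ∈ pvP errors pc, ∀ b ∈ pvS errors pc, pvKeyB pc a < pvKeyB pc b := by
  unfold pvP pvS
  intro a ha b hb
  have ha1 : a ∈ pvDP pc := (List.mem_filter.mp ha).1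
  have hb' : b ∉ pvDP pc := by
    have := (List.mem_filter.mp hb).2; simpa using this
  obtain ⟨i, hi, rfl⟩ := List.mem_iff_getElem.mp ha1
  unfold pvKeyB
  rw [pv_getD_getElem pc i hi, pv_getD_not_mem pc b _ hb', Prod.Lex.toLex_lt_toLex]
  left
  show (i : Int) < ((pvRank pc).size : Int)
  rw [pv_rank_size]
  exact_mod_cast hi

theorem pv_perm (errors : List (String × Int)) (pc : List String) :
    (pvP errors pc ++ pvS errors pc).Perm (pvKS errors) := by
  have h2 : (pvSrt errors).Perm (pvKS errors) := PySem.List.sorted_perm _ _ _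
  have hsrtnd : (pvSrt errors).Nodup := h2.symm.nodup (PySem.Set.nodup_ofList _)
  have h1 : ((pvSrt errors).filter (fun k => decide (k ∈ pvDP pc))
      ++ (pvSrt errors).filter (fun k => !decide (k ∈ pvDP pc))).Perm (pvSrt errors) :=
    List.filter_append_perm _ _
  have hdpnd : (pvDP pc).Nodup := by unfold pvDP; exact PySem.Set.nodup_ofList _
  have hP : (pvP errors pc).Perm ((pvSrt errors).filter (fun k => decide (k ∈ pvDP pc))) := by
    unfold pvP
    rw [List.perm_ext_iff_of_nodup (List.Nodup.filter _ hdpnd) (List.Nodup.filter _ hsrtnd)]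
    intro x
    unfold pvSrt pvKS pvKL
    simp only [List.mem_filter, PySem.List.mem_sorted, PySem.Set.mem_ofList,
      decide_eq_true_eq]
    tauto
  exact ((hP.append_right _).trans h1).trans h2

-- B's single sort names exactly A's two-block list
theorem pv_B_pre (errors : List (String × Int)) (pc : List String) :
    PySem.List.sorted (pvKS errors) (pvKeyB pc) false = pvP errors pc ++ pvS errors pc := by
  exact PySem.List.sorted_eq_of_perm_of_pairwise_lt _ _ _ (pv_perm errors pc)
    (List.pairwise_append.mpr ⟨pv_pairwise_P errors pc, pv_pairwise_S errors pc,
      fun a ha b hb => pv_cross errors pc a ha b hb⟩)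

-- A's two loops name exactly the same list P ++ S
theorem pv_A_pre (errors : List (String × Int)) (pc : List String) :
    ((PySem.List.sorted (PySem.List.dedup (errors.map (·.1))) (fun x => x) false).foldl
      (fun (p : List String × PySem.Set String) k =>
        if !decide (k ∈ p.2) then (p.1 ++ [k], PySem.Set.add p.2 k) else p)
      ((pc ++ ["TA"]).foldl
        (fun (p : List String × PySem.Set String) k =>
          if decide (k ∈ errors.map (·.1)) && !decide (k ∈ p.2) then
            (p.1 ++ [k], PySem.Set.add p.2 k) else p)
        ([], PySem.Set.ofList []))).1
      = pvP errors pc ++ pvS errors pc := by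
  have hsrtnd : (pvSrt errors).Nodup :=
    (PySem.List.sorted_perm _ _ _).symm.nodup (PySem.Set.nodup_ofList _)
  have key : ∀ (q : List String × PySem.Set String), (∀ x, x ∈ q.2 ↔ x ∈ q.1) →
      q.1 = pvP errors pc →
      ((PySem.List.sorted (PySem.List.dedup (errors.map (·.1))) (fun x => x) false).foldl
        (fun (p : List String × PySem.Set String) k =>
          if !decide (k ∈ p.2) then (p.1 ++ [k], PySem.Set.add p.2 k) else p) q).1
        = pvP errors pc ++ pvS errors pc := by
    rintro ⟨a, s⟩ hq hq1
    have hq1' : a = pvP errors pc := hq1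
    rw [pv_loopA2 _ a s hq, hq1']
    congr 1
    have hlist : PySem.List.sorted (PySem.List.dedup (errors.map (·.1))) (fun x => x) false
        = pvSrt errors := by
      unfold pvSrt pvKS pvKL
      rw [PySem.List.dedup_eq_ofList]
    rw [hlist, PySem.Set.ofList_eq_self_of_nodup _ hsrtnd]
    unfold pvS
    apply List.filter_congr
    intro k hk
    have hk' : k ∈ pvKL errors := by
      have := (PySem.List.mem_sorted _ _ _ _).mp hk
      unfold pvKS at this
      exact (PySem.Set.mem_ofList _ _).mp this
    have hiff : k ∈ pvP errors pc ↔ k ∈ pvDP pc := by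
      unfold pvP
      simp only [List.mem_filter, decide_eq_true_eq]
      tauto
    simp [hiff]
  obtain ⟨h1, h2⟩ := pv_loopA (fun k => decide (k ∈ errors.map (·.1))) (pc ++ ["TA"]) []
    (PySem.Set.ofList []) (by intro x; simp [PySem.Set.ofList_nil])
  refine key _ h2 ?_
  rw [h1]
  unfold pvP pvDP pvKL
  simp

theorem pv_B_pre' (errors : List (String × Int)) (pc : List String) :
    PySem.List.sorted (PySem.List.dedup (errors.map (·.1)))
      (fun k => toLex
        ((((PySem.List.enumerate (PySem.List.dedup (pc ++ ["TA"]))).foldl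
            (fun d p => d.insert p.2 p.1) PySem.Dict.empty)).getD k
          ((((PySem.List.enumerate (PySem.List.dedup (pc ++ ["TA"]))).foldl
            (fun d p => d.insert p.2 p.1) PySem.Dict.empty)).size : Int), k)) false
      = pvP errors pc ++ pvS errors pc := by
  show PySem.List.sorted (PySem.List.dedup (errors.map (·.1))) (pvKeyB pc) false
      = pvP errors pc ++ pvS errors pc
  rw [PySem.List.dedup_eq_ofList]
  exact pv_B_pre errors pc

-- ===== VERDICT (by name: the statement is the Claim_ definition above) =====
theorem compact_error_keys_spec : Claim_equal_compact_error_keys := by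
  intro errors pc m _
  unfold Spec_compact_error_keys compact_error_keys compact_error_keys_alt
  simp only []
  rw [pv_A_pre errors pc, pv_B_pre' errors pc]
  by_cases h : PySem.List.slice (pvP errors pc ++ pvS errors pc) none (some m) = [] <;>
    simp [h]
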